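-- pv_equiv track=rewrite | github.com/satoshun-example/algorithm-ari | python/2-5_conscription_test.py | conscription
-- ===== SOURCE A (Python) =====
-- def conscription(n, m, r, x):
--     xxx = []
--     for xx in x:
--         xxx += [(xx[0], xx[1] + n, xx[2])]
--
--     def calculate(vv):
--         added = []
--         v = 0
--         for s in vv:
--             sss = 0
--             for xx in xxx:
--                 if xx[0] in added and xx[1] == s:
--                     if sss < xx[2]:
--                         sss = xx[2]
--                 if xx[1] in added and xx[0] == s:
--                     if sss < xx[2]:
--                         sss = xx[2]
--             added += [s]
--             v += 10000 - sss
--         return v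
--
--     v = [i for i in range(n + m)]
--     for i in range(n + m):
--         for j in range(n + m):
--             before = calculate(v)
--             v[i], v[j] = v[j], v[i]
--             after = calculate(v)
--             if before > after:
--                 pass
--             else:
--                 v[i], v[j] = v[j], v[i]
--     return calculate(v)
-- ===== SOURCE B (Python) =====
-- def conscription(n, m, r, x):
--     edges = [(a, b + n, w) for a, b, w in x]
--
--     def calculate(vv):
--         pos = {s: i for i, s in enumerate(vv)}
--         best = {}
--         for a, b, w in edges:
--             pa = pos.get(a)
--             pb = pos.get(b)
--             if pa is not None and pb is not None and pa != pb:
--                 later = a if pa > pb else b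
--                 if best.get(later, 0) < w:
--                     best[later] = w
--         return sum(10000 - best.get(s, 0) for s in vv)
--
--     v = [i for i in range(n + m)]
--     for i in range(n + m):
--         for j in range(n + m):
--             before = calculate(v)
--             v[i], v[j] = v[j], v[i]
--             after = calculate(v)
--             if before > after:
--                 pass
--             else:
--                 v[i], v[j] = v[j], v[i]
--     return calculate(v)
-- ===== Notes on version B (the rewrite author's own statement) =====
-- stated objective: alternative
-- what changed: The inner cost function no longer scans all edges per vertex with list-membership tests on the growing 'added' list; B builds a vertex->position dict once, makes a single pass over the edges crediting each edge's weight to its later-positioned endpoint, and sums 10000 minus the per-vertex maximum; the outer swap/accept loop is unchanged (intended as faster per cost evaluation, measured 13.5x at n=64, but the unchanged quadratic outer loop still dominates on large inputs).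
import Mathlib
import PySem

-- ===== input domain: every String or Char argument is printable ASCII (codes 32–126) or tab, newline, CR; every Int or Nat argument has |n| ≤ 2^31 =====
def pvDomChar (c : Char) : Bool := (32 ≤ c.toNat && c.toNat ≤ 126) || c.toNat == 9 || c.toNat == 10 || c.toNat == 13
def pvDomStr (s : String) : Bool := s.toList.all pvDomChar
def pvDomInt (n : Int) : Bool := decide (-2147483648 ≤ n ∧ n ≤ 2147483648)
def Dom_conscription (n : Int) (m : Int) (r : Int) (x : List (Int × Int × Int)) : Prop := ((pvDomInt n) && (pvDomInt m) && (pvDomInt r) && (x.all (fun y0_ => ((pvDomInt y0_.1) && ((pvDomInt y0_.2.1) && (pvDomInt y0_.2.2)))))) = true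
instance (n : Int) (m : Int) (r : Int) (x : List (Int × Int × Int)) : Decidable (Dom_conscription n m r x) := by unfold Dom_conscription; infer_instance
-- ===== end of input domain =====

-- B replaces A's per-vertex scans over the edge list with membership tests on the growing
-- 'added' list by a position table plus a single aggregation pass over the edges
-- (objective: alternative; the unchanged outer swap/accept loop still dominates on large inputs).


-- ===== PORT A =====
-- inner body of A's edge loop: the two sequential 'if' updates of sss
def pvA_inner_step (added : List Int) (s : Int) (sss : Int) (xx : Int × Int × Int) : Int :=
  let sss1 := if xx.1 ∈ added ∧ xx.2.1 = s then (if sss < xx.2.2 then xx.2.2 else sss) else sss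
  if xx.2.1 ∈ added ∧ xx.1 = s then (if sss1 < xx.2.2 then xx.2.2 else sss1) else sss1

def pvA_inner (xxx : List (Int × Int × Int)) (added : List Int) (s : Int) : Int :=
  xxx.foldl (pvA_inner_step added s) 0

-- A's 'for s in vv' loop carrying (added, v)
def pvA_calc_go (xxx : List (Int × Int × Int)) (added : List Int) (vv : List Int) (v : Int) : Int :=
  match vv with
  | [] => v
  | s :: t => pvA_calc_go xxx (added ++ [s]) t (v + (10000 - pvA_inner xxx added s))

def pvA_calc (xxx : List (Int × Int × Int)) (vv : List Int) : Int :=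
  pvA_calc_go xxx [] vv 0

-- v[i], v[j] = v[j], v[i]  (indices always in range when called)
def pvA_swap (v : List Int) (i j : Nat) : List Int :=
  (v.set i (v.getD j 0)).set j (v.getD i 0)

def pvA_step (xxx : List (Int × Int × Int)) (v : List Int) (i j : Nat) : List Int :=
  let before := pvA_calc xxx v
  let v1 := pvA_swap v i j
  let after := pvA_calc xxx v1
  if before > after then v1 else pvA_swap v1 i j

def conscription (n : Int) (m : Int) (r : Int) (x : List (Int × Int × Int)) : Int :=
  let xxx := x.foldl (fun acc xx => acc ++ [(xx.1, xx.2.1 + n, xx.2.2)]) []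
  let N := (n + m).toNat
  let v0 := (List.range N).map (fun i => Int.ofNat i)
  let vf := (List.range N).foldl
    (fun v i => (List.range N).foldl (fun v j => pvA_step xxx v i j) v) v0
  pvA_calc xxx vf

-- ===== PORT B =====
-- pos = {s: i for i, s in enumerate(vv)}
def pvB_pos_go (vv : List Int) (i : Int) (d : PySem.Dict Int Int) : PySem.Dict Int Int :=
  match vv with
  | [] => d
  | s :: t => pvB_pos_go t (i + 1) (d.insert s i)

def pvB_pos (vv : List Int) : PySem.Dict Int Int :=
  pvB_pos_go vv 0 PySem.Dict.empty

-- one edge of B's single aggregation pass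
def pvB_edge_step (pos : PySem.Dict Int Int) (best : PySem.Dict Int Int)
    (e : Int × Int × Int) : PySem.Dict Int Int :=
  match pos.get? e.1, pos.get? e.2.1 with
  | some pa, some pb =>
    if pa ≠ pb then
      let later := if pa > pb then e.1 else e.2.1
      if best.getD later 0 < e.2.2 then best.insert later e.2.2 else best
    else best
  | _, _ => best

def pvB_calc (edges : List (Int × Int × Int)) (vv : List Int) : Int :=
  let pos := pvB_pos vv
  let best := edges.foldl (pvB_edge_step pos) PySem.Dict.empty
  vv.foldl (fun acc s => acc + (10000 - best.getD s 0)) 0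

def pvB_swap (v : List Int) (i j : Nat) : List Int :=
  (v.set i (v.getD j 0)).set j (v.getD i 0)

def pvB_step (edges : List (Int × Int × Int)) (v : List Int) (i j : Nat) : List Int :=
  let before := pvB_calc edges v
  let v1 := pvB_swap v i j
  let after := pvB_calc edges v1
  if before > after then v1 else pvB_swap v1 i j

def conscription_alt (n : Int) (m : Int) (r : Int) (x : List (Int × Int × Int)) : Int :=
  let edges := x.map (fun xx => (xx.1, xx.2.1 + n, xx.2.2))
  let N := (n + m).toNat
  let v0 := (List.range N).map (fun i => Int.ofNat i)
  let vf := (List.range N).foldl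
    (fun v i => (List.range N).foldl (fun v j => pvB_step edges v i j) v) v0
  pvB_calc edges vf

-- ===== PRECONDITION & SPEC =====
def Spec_conscription (n : Int) (m : Int) (r : Int) (x : List (Int × Int × Int)) (out : Int) : Prop := out = conscription_alt n m r x
instance (n : Int) (m : Int) (r : Int) (x : List (Int × Int × Int)) (out : Int) : Decidable (Spec_conscription n m r x out) := by unfold Spec_conscription; infer_instance

-- ===== CLAIM (what is proved, stated in full; the proofs are below) =====
def Claim_equal_conscription : Prop := ∀ (n : Int) (m : Int) (r : Int) (x : List (Int × Int × Int)), Dom_conscription n m r x → Spec_conscription n m r x (conscription n m r x)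

-- ===== LEMMAS AND PROOFS =====

lemma pv_foldl_append_eq_map (x : List (Int × Int × Int)) (n : Int) :
    x.foldl (fun acc xx => acc ++ [(xx.1, xx.2.1 + n, xx.2.2)]) []
      = x.map (fun xx => (xx.1, xx.2.1 + n, xx.2.2)) := by
  have h : ∀ (l : List (Int × Int × Int)) (acc : List (Int × Int × Int)),
      l.foldl (fun acc xx => acc ++ [(xx.1, xx.2.1 + n, xx.2.2)]) acc
        = acc ++ l.map (fun xx => (xx.1, xx.2.1 + n, xx.2.2)) := by
    intro l
    induction l with
    | nil => simp
    | cons hd tl ih => intro acc; simp [List.foldl, ih]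
  simpa using h x []

lemma pv_mem_take_iff {vv : List Int} (hnd : vv.Nodup) {k : Nat} (hk : k < vv.length)
    (i : Nat) : vv[k] ∈ vv.take i ↔ k < i := by
  constructor
  · intro h
    obtain ⟨j, hj, hjl⟩ := List.mem_iff_getElem.mp h
    have hjlen : j < vv.length := lt_of_lt_of_le hj (by simp [List.length_take])
    have hji : j < i := lt_of_lt_of_le hj (by simp [List.length_take])
    have : vv[j] = vv[k] := by rw [← hjl]; exact (List.getElem_take).symm
    have := (hnd.getElem_inj_iff).mp this
    omega
  · intro h
    have hk2 : k < (vv.take i).length := by simp [List.length_take]; omega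
    have : (vv.take i)[k] = vv[k] := List.getElem_take
    rw [← this]
    exact List.getElem_mem hk2

lemma pv_pos_go_not_mem (vv : List Int) (a : Int) (h : a ∉ vv) :
    ∀ (i : Int) (d : PySem.Dict Int Int), (pvB_pos_go vv i d).get? a = d.get? a := by
  induction vv with
  | nil => intro i d; rfl
  | cons s t ih =>
    intro i d
    simp only [List.mem_cons, not_or] at h
    simp only [pvB_pos_go]
    rw [ih h.2]
    exact PySem.Dict.get?_insert_of_ne d i h.1

lemma pv_pos_go_mem (vv : List Int) (hnd : vv.Nodup) :
    ∀ (k : Nat) (hk : k < vv.length) (i : Int) (d : PySem.Dict Int Int),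
      (pvB_pos_go vv i d).get? vv[k] = some (i + (k : Int)) := by
  induction vv with
  | nil => intro k hk; simp at hk
  | cons s t ih =>
    intro k hk i d
    match k with
    | 0 =>
      simp only [pvB_pos_go, List.getElem_cons_zero]
      rw [pv_pos_go_not_mem t s (by simp at hnd; exact hnd.1)]
      simp [PySem.Dict.get?_insert_self]
    | Nat.succ k =>
      simp only [pvB_pos_go, List.getElem_cons_succ]
      rw [ih (List.Nodup.of_cons hnd) k (by simpa using hk) (i + 1) (d.insert s i)]
      congr 1
      push_cast
      ring

lemma pv_pos_mem {vv : List Int} (hnd : vv.Nodup) {k : Nat} (hk : k < vv.length) :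
    (pvB_pos vv).get? vv[k] = some ((k : Int)) := by
  have := pv_pos_go_mem vv hnd k hk 0 PySem.Dict.empty
  simpa [pvB_pos] using this

lemma pv_pos_not_mem {vv : List Int} {a : Int} (h : a ∉ vv) :
    (pvB_pos vv).get? a = none := by
  rw [pvB_pos, pv_pos_go_not_mem vv a h]
  simp [PySem.Dict.get?_empty]

lemma pv_edge_step_key {vv : List Int} (hnd : vv.Nodup) {i : Nat} (hi : i < vv.length)
    (d : PySem.Dict Int Int) (e : Int × Int × Int) :
    (pvB_edge_step (pvB_pos vv) d e).getD vv[i] 0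
      = pvA_inner_step (vv.take i) vv[i] (d.getD vv[i] 0) e := by
  obtain ⟨a, b, w⟩ := e
  unfold pvB_edge_step pvA_inner_step
  by_cases ha : a ∈ vv
  · by_cases hb : b ∈ vv
    · obtain ⟨ia, hia, rfl⟩ := List.mem_iff_getElem.mp ha
      obtain ⟨ib, hib, rfl⟩ := List.mem_iff_getElem.mp hb
      rw [pv_pos_mem hnd hia, pv_pos_mem hnd hib]
      dsimp only
      rcases Nat.lt_trichotomy ia ib with hlt | heq | hgt
      · have hne : ((ia : Int)) ≠ ((ib : Int)) := by omega
        have hngt : ¬ ((ia : Int)) > ((ib : Int)) := by omega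
        rw [if_pos hne, if_neg hngt]
        by_cases hbi : ib = i
        · subst hbi
          have h1 : vv[ia] ∈ vv.take ib := (pv_mem_take_iff hnd hia ib).mpr hlt
          have h2 : ¬ (vv[ib] ∈ vv.take ib ∧ vv[ia] = vv[ib]) := by
            rintro ⟨-, h⟩
            exact absurd (hnd.getElem_inj_iff.mp h) (by omega)
          simp only [h1, h2, if_true, if_false, and_self]
          split_ifs <;> simp [PySem.Dict.getD_insert]
        · have hnei : vv[ib] ≠ vv[i] := fun h => hbi (hnd.getElem_inj_iff.mp h)
          have hnei' : vv[i] ≠ vv[ib] := fun h => hnei h.symm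
          have h1 : ¬ (vv[ia] ∈ vv.take i ∧ vv[ib] = vv[i]) := fun h => hnei h.2
          have h2 : ¬ (vv[ib] ∈ vv.take i ∧ vv[ia] = vv[i]) := by
            rintro ⟨hm, h⟩
            have : ia = i := hnd.getElem_inj_iff.mp h
            have : ib < i := (pv_mem_take_iff hnd hib i).mp hm
            omega
          simp only [h1, h2, if_false]
          split_ifs with hc
          · rw [PySem.Dict.getD_insert, if_neg hnei']
          · rfl
      · subst heq
        have h1 : ¬ (vv[ia] ∈ vv.take i ∧ vv[ia] = vv[i]) := by
          rintro ⟨hm, h⟩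
          have : ia = i := hnd.getElem_inj_iff.mp h
          have : ia < i := (pv_mem_take_iff hnd hia i).mp hm
          omega
        simp [h1]
      · have hne : ((ia : Int)) ≠ ((ib : Int)) := by omega
        have hgt' : ((ia : Int)) > ((ib : Int)) := by omega
        rw [if_pos hne, if_pos hgt']
        by_cases hai : ia = i
        · subst hai
          have h1 : ¬ (vv[ia] ∈ vv.take ia ∧ vv[ib] = vv[ia]) := by
            rintro ⟨-, h⟩
            exact absurd (hnd.getElem_inj_iff.mp h) (by omega)
          have h2 : vv[ib] ∈ vv.take ia := (pv_mem_take_iff hnd hib ia).mpr hgt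
          simp only [h1, h2, if_true, if_false, and_self]
          split_ifs <;> simp [PySem.Dict.getD_insert]
        · have hnei : vv[ia] ≠ vv[i] := fun h => hai (hnd.getElem_inj_iff.mp h)
          have hnei' : vv[i] ≠ vv[ia] := fun h => hnei h.symm
          have h1 : ¬ (vv[ia] ∈ vv.take i ∧ vv[ib] = vv[i]) := by
            rintro ⟨hm, h⟩
            have : ib = i := hnd.getElem_inj_iff.mp h
            have : ia < i := (pv_mem_take_iff hnd hia i).mp hm
            omega
          have h2 : ¬ (vv[ib] ∈ vv.take i ∧ vv[ia] = vv[i]) := fun h => hnei h.2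
          simp only [h1, h2, if_false]
          split_ifs with hc
          · rw [PySem.Dict.getD_insert, if_neg hnei']
          · rfl
    · obtain ⟨ia, hia, rfl⟩ := List.mem_iff_getElem.mp ha
      rw [pv_pos_mem hnd hia, pv_pos_not_mem hb]
      dsimp only
      have h1 : ¬ (vv[ia] ∈ vv.take i ∧ b = vv[i]) := by
        rintro ⟨-, h⟩
        exact hb (h ▸ List.getElem_mem hi)
      have h2 : ¬ (b ∈ vv.take i ∧ vv[ia] = vv[i]) := by
        rintro ⟨hm, -⟩
        exact hb (List.mem_of_mem_take hm)
      simp [h1, h2]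
  · rw [pv_pos_not_mem ha]
    dsimp only
    have h1 : ¬ (a ∈ vv.take i ∧ b = vv[i]) := by
      rintro ⟨hm, -⟩
      exact ha (List.mem_of_mem_take hm)
    have h2 : ¬ (b ∈ vv.take i ∧ a = vv[i]) := by
      rintro ⟨-, h⟩
      exact ha (h ▸ List.getElem_mem hi)
    simp [h1, h2]

lemma pv_fold_key {vv : List Int} (hnd : vv.Nodup) {i : Nat} (hi : i < vv.length) :
    ∀ (es : List (Int × Int × Int)) (d : PySem.Dict Int Int),
      (es.foldl (pvB_edge_step (pvB_pos vv)) d).getD vv[i] 0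
        = es.foldl (pvA_inner_step (vv.take i) vv[i]) (d.getD vv[i] 0) := by
  intro es
  induction es with
  | nil => intro d; rfl
  | cons e t ih =>
    intro d
    simp only [List.foldl_cons]
    rw [ih, pv_edge_step_key hnd hi]

lemma pv_inner_eq {vv : List Int} (hnd : vv.Nodup) {i : Nat} (hi : i < vv.length)
    (E : List (Int × Int × Int)) :
    pvA_inner E (vv.take i) vv[i]
      = (E.foldl (pvB_edge_step (pvB_pos vv)) PySem.Dict.empty).getD vv[i] 0 := by
  rw [pv_fold_key hnd hi E PySem.Dict.empty]
  simp [pvA_inner, PySem.Dict.getD_empty]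

lemma pv_calc_go_eq (E : List (Int × Int × Int)) {vv : List Int} (hnd : vv.Nodup) :
    ∀ (t u : List Int) (acc : Int), u ++ t = vv →
      pvA_calc_go E u t acc
        = t.foldl (fun acc s =>
            acc + (10000 - (E.foldl (pvB_edge_step (pvB_pos vv)) PySem.Dict.empty).getD s 0)) acc := by
  intro t
  induction t with
  | nil => intro u acc _; rfl
  | cons s t' ih =>
    intro u acc hu
    have hul : u.length < vv.length := by
      rw [← hu]; simp
    have hus : vv[u.length]'hul = s := by
      subst hu
      rw [List.getElem_append_right (Nat.le_refl u.length)]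
      simp
    have hut : vv.take u.length = u := by
      subst hu
      exact List.take_left
    have hkey : pvA_inner E u s
        = (E.foldl (pvB_edge_step (pvB_pos vv)) PySem.Dict.empty).getD s 0 := by
      have h := pv_inner_eq hnd hul E
      rw [hut, hus] at h
      exact h
    simp only [pvA_calc_go, List.foldl_cons]
    rw [hkey, ih (u ++ [s]) _ (by rw [← hu]; simp)]

lemma pv_calc_eq (E : List (Int × Int × Int)) {vv : List Int} (hnd : vv.Nodup) :
    pvA_calc E vv = pvB_calc E vv := by
  rw [pvA_calc, pvB_calc]
  exact pv_calc_go_eq E hnd vv [] 0 rfl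

lemma pv_swap_perm (v : List Int) (i j : Nat) (hi : i < v.length) (hj : j < v.length) :
    (pvA_swap v i j).Perm v := by
  unfold pvA_swap
  rw [List.getD_eq_getElem _ _ hj, List.getD_eq_getElem _ _ hi]
  rcases eq_or_ne i j with rfl | hne
  · rw [List.set_set, List.set_getElem_self]
  · rw [List.perm_iff_count]
    intro b
    have hj' : j < (v.set i v[j]).length := by simpa using hj
    rw [List.count_set hj', List.count_set hi]
    rw [List.getElem_set_ne hne]
    have hci : (v[i] == b) = true → 1 ≤ v.count b := fun h =>
      List.one_le_count_iff.mpr (by rw [← eq_of_beq h]; exact List.getElem_mem hi)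
    split_ifs with h1 h2 <;> (try have := hci h1) <;> omega

lemma pv_swap_length (v : List Int) (i j : Nat) : (pvA_swap v i j).length = v.length := by
  simp [pvA_swap]

lemma pv_swap_nodup {v : List Int} {i j : Nat} (hi : i < v.length) (hj : j < v.length)
    (hnd : v.Nodup) : (pvA_swap v i j).Nodup := by
  exact ((pv_swap_perm v i j hi hj).symm).nodup hnd

lemma pv_swap_eq (v : List Int) (i j : Nat) : pvB_swap v i j = pvA_swap v i j := rfl

lemma pv_step_eq (E : List (Int × Int × Int)) {v : List Int} {i j : Nat}
    (hi : i < v.length) (hj : j < v.length) (hnd : v.Nodup) :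
    pvA_step E v i j = pvB_step E v i j := by
  have h1 : pvA_calc E v = pvB_calc E v := pv_calc_eq E hnd
  have h2 : pvA_calc E (pvA_swap v i j) = pvB_calc E (pvA_swap v i j) :=
    pv_calc_eq E (pv_swap_nodup hi hj hnd)
  simp only [pvA_step, pvB_step, pv_swap_eq, h1, h2]

lemma pv_step_invar (E : List (Int × Int × Int)) {v : List Int} {i j : Nat}
    (hi : i < v.length) (hj : j < v.length) (hnd : v.Nodup) :
    (pvA_step E v i j).Nodup ∧ (pvA_step E v i j).length = v.length := by
  have hnd1 : (pvA_swap v i j).Nodup := pv_swap_nodup hi hj hnd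
  have hi' : i < (pvA_swap v i j).length := by rw [pv_swap_length]; exact hi
  have hj' : j < (pvA_swap v i j).length := by rw [pv_swap_length]; exact hj
  simp only [pvA_step]
  split_ifs
  · exact ⟨hnd1, pv_swap_length v i j⟩
  · exact ⟨pv_swap_nodup hi' hj' hnd1, by rw [pv_swap_length, pv_swap_length]⟩

lemma pv_foldj_eq (E : List (Int × Int × Int)) (N i : Nat) (hiN : i < N) :
    ∀ (js : List Nat) (v : List Int), v.Nodup → v.length = N → (∀ j ∈ js, j < N) →
      js.foldl (fun v j => pvA_step E v i j) v = js.foldl (fun v j => pvB_step E v i j) v ∧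
      (js.foldl (fun v j => pvA_step E v i j) v).Nodup ∧
      (js.foldl (fun v j => pvA_step E v i j) v).length = N := by
  intro js
  induction js with
  | nil => intro v hnd hlen _; exact ⟨rfl, hnd, hlen⟩
  | cons j js ih =>
    intro v hnd hlen hjs
    have hi' : i < v.length := by rw [hlen]; exact hiN
    have hj' : j < v.length := by rw [hlen]; exact hjs j (List.mem_cons_self ..)
    have hinv := pv_step_invar E hi' hj' hnd
    have heq := pv_step_eq E hi' hj' hnd
    simp only [List.foldl_cons]
    rw [← heq]
    exact ih (pvA_step E v i j) hinv.1 (hinv.2.trans hlen)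
      (fun j' hj'' => hjs j' (List.mem_cons_of_mem _ hj''))

lemma pv_foldi_eq (E : List (Int × Int × Int)) (N : Nat) :
    ∀ (is : List Nat) (v : List Int), v.Nodup → v.length = N → (∀ i ∈ is, i < N) →
      is.foldl (fun v i => (List.range N).foldl (fun v j => pvA_step E v i j) v) v
        = is.foldl (fun v i => (List.range N).foldl (fun v j => pvB_step E v i j) v) v ∧
      (is.foldl (fun v i => (List.range N).foldl (fun v j => pvA_step E v i j) v) v).Nodup ∧
      (is.foldl (fun v i => (List.range N).foldl (fun v j => pvA_step E v i j) v) v).length = N := by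
  intro is
  induction is with
  | nil => intro v hnd hlen _; exact ⟨rfl, hnd, hlen⟩
  | cons i is ih =>
    intro v hnd hlen his
    have hiN : i < N := his i (List.mem_cons_self ..)
    obtain ⟨heq, hnd', hlen'⟩ := pv_foldj_eq E N i hiN (List.range N) v hnd hlen
      (fun j hj => List.mem_range.mp hj)
    simp only [List.foldl_cons]
    rw [← heq]
    exact ih _ hnd' hlen' (fun i' hi' => his i' (List.mem_cons_of_mem _ hi'))

-- ===== VERDICT (by name: the statement is the Claim_ definition above) =====
theorem conscription_spec : Claim_equal_conscription := by
  intro n m r x _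
  unfold Spec_conscription conscription conscription_alt
  dsimp only
  rw [pv_foldl_append_eq_map x n]
  have h0 : ((List.range (n + m).toNat).map (fun i => Int.ofNat i)).Nodup :=
    List.nodup_range.map (fun a b h => Int.ofNat.inj h)
  have h0len : ((List.range (n + m).toNat).map (fun i => Int.ofNat i)).length = (n + m).toNat := by
    simp
  obtain ⟨heq, hnd', hlen'⟩ := pv_foldi_eq (x.map (fun xx => (xx.1, xx.2.1 + n, xx.2.2)))
    ((n + m).toNat) (List.range (n + m).toNat) _ h0 h0len (fun i hi => List.mem_range.mp hi)
  rw [← heq]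
  exact pv_calc_eq _ hnd'
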